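-- pv_equiv track=rewrite | github.com/tagoyal/sow-reap-paraphrasing | processing/convert_hdf5_reap.py | reverse_bpe
-- ===== SOURCE A (Python) =====
-- def reverse_bpe(sent, reorder):
--     x = []
--     r = []
--     cache = ''
--
--     for w, re in zip(sent, reorder):
--         if w.endswith('@@'):
--             cache += w.replace('@@', '')
--         elif cache != '':
--             x.append(cache + w)
--             cache = ''
--             r.append(re)
--         else:
--             x.append(w)
--             r.append(re)
--
--     return ' '.join(x), r
-- ===== SOURCE B (Python) =====
-- def reverse_bpe(sent, reorder):
--     pairs = list(zip(sent, reorder))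
--     # second output: the reorder tags of exactly the non-continuation tokens
--     r = [re for w, re in pairs if not w.endswith('@@')]
--
--     # first output: split the token stream at each non-continuation token;
--     # every word is the '@@'-stripped run before the boundary plus the boundary
--     # token itself; a trailing run with no boundary produces no word.
--     def words(ps):
--         out = []
--         j = 0
--         n = len(ps)
--         while True:
--             i = j
--             while i < n and ps[i][0].endswith('@@'):
--                 i += 1
--             if i == n:
--                 return out
--             out.append(''.join(t.replace('@@', '') for t, _ in ps[j:i]) + ps[i][0])
--             j = i + 1
--
--     return ' '.join(words(pairs)), r
-- ===== Notes on version B (the rewrite author's own statement) =====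
-- stated objective: alternative
-- what changed: Replaces A's single interleaved loop with a threaded string cache by two independent passes: a filter/comprehension producing the reorder tags, and a recursive splitter that cuts the token stream at each non-'@@' token and joins each stripped run with its boundary token in one step.
import Mathlib
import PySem

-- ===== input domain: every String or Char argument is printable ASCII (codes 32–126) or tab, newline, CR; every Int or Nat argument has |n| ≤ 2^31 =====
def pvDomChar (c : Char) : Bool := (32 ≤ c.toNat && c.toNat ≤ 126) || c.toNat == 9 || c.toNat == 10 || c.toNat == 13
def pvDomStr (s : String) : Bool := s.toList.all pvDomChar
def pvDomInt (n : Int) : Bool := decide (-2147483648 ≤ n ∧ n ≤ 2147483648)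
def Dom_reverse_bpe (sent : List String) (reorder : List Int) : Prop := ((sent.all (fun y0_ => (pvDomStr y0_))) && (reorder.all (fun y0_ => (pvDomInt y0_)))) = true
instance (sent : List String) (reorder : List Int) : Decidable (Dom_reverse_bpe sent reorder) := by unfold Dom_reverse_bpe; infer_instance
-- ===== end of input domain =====

-- B replaces A's single interleaved loop (string cache threaded through three branches) by two
-- independent passes: a filter for the reorder tags and a recursive splitter that cuts the token
-- stream at each non-'@@' token; same cost, chosen as a clearer decomposition (objective: alternative).

-- ===== PORT A =====
-- A's loop body; state is (x, r, cache)
def pvAStep (st : List String × List Int × String) (wr : String × Int) : List String × List Int × String :=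
  if PySem.Str.endswith wr.1 "@@" then
    (st.1, st.2.1, st.2.2 ++ PySem.Str.replace wr.1 "@@" "")
  else if st.2.2 ≠ "" then
    (st.1 ++ [st.2.2 ++ wr.1], st.2.1 ++ [wr.2], "")
  else
    (st.1 ++ [wr.1], st.2.1 ++ [wr.2], st.2.2)

def reverse_bpe (sent : List String) (reorder : List Int) : String × List Int :=
  let st := (sent.zip reorder).foldl pvAStep ([], [], "")
  (PySem.Str.join " " st.1, st.2.1)

-- ===== PORT B =====
def pvCont (p : String × Int) : Bool := PySem.Str.endswith p.1 "@@"
def pvRepl (t : String) : String := PySem.Str.replace t "@@" ""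

-- Source B's `words`: scan to the first non-continuation token (the while loop = takeWhile/dropWhile),
-- emit the stripped run joined with that token, recurse on the remainder
def pvWords (ps : List (String × Int)) : List String :=
  match h : ps.dropWhile pvCont with
  | [] => []
  | p :: rest =>
    (PySem.Str.join "" ((ps.takeWhile pvCont).map (fun t => pvRepl t.1)) ++ p.1) :: pvWords rest
termination_by ps.length
decreasing_by
  have hle := List.length_dropWhile_le pvCont ps
  rw [h] at hle
  simp at hle
  omega

def reverse_bpe_alt (sent : List String) (reorder : List Int) : String × List Int :=
  let pairs := sent.zip reorder
  (PySem.Str.join " " (pvWords pairs), (pairs.filter (fun p => !pvCont p)).map Prod.snd)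

-- ===== PRECONDITION & SPEC =====
def Spec_reverse_bpe (sent : List String) (reorder : List Int) (out : String × List Int) : Prop := out = reverse_bpe_alt sent reorder
instance (sent : List String) (reorder : List Int) (out : String × List Int) : Decidable (Spec_reverse_bpe sent reorder out) := by unfold Spec_reverse_bpe; infer_instance

-- ===== CLAIM (what is proved, stated in full; the proofs are below) =====
def Claim_equal_reverse_bpe : Prop := ∀ (sent : List String) (reorder : List Int), Dom_reverse_bpe sent reorder → Spec_reverse_bpe sent reorder (reverse_bpe sent reorder)

-- ===== LEMMAS AND PROOFS =====

lemma pv_empty_append (s : String) : "" ++ s = s := by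
  rw [← String.toList_inj]; simp

lemma pv_append_assoc (a b c : String) : a ++ b ++ c = a ++ (b ++ c) := by
  rw [← String.toList_inj]; simp

lemma pv_join_empty_nil : PySem.Str.join "" ([] : List String) = "" := by decide

lemma pv_join_empty_cons (a : String) (l : List String) :
    PySem.Str.join "" (a :: l) = a ++ PySem.Str.join "" l := by
  cases l with
  | nil =>
    rw [← String.toList_inj]
    simp [PySem.Str.toList_join, PySem.Chars.join_singleton, PySem.Chars.join_nil]
  | cons b r =>
    rw [← String.toList_inj]
    simp [PySem.Str.toList_join, PySem.Chars.join_cons_cons]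

-- proof-side reformulation of A's loop: the word list it builds, given the pending cache
def pvBAux (cache : String) : List (String × Int) → List String
  | [] => []
  | p :: ps => if pvCont p then pvBAux (cache ++ pvRepl p.1) ps else (cache ++ p.1) :: pvBAux "" ps

-- the final cache value of A's loop (discarded by A; needed to state the full loop invariant)
def pvCAux (cache : String) : List (String × Int) → String
  | [] => cache
  | p :: ps => if pvCont p then pvCAux (cache ++ pvRepl p.1) ps else pvCAux "" ps

lemma pv_foldA (ps : List (String × Int)) :
    ∀ (x : List String) (r : List Int) (cache : String),
    ps.foldl pvAStep (x, r, cache) =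
      (x ++ pvBAux cache ps, r ++ (ps.filter (fun p => !pvCont p)).map Prod.snd, pvCAux cache ps) := by
  induction ps with
  | nil => intro x r cache; simp [pvBAux, pvCAux]
  | cons p ps ih =>
    intro x r cache
    rw [List.foldl_cons]
    by_cases hc : pvCont p = true
    · have hc0 : PySem.Str.endswith p.1 "@@" = true := by simp only [pvCont] at hc; exact hc
      have hstep : pvAStep (x, r, cache) p = (x, r, cache ++ pvRepl p.1) := by
        simp only [pvAStep, hc0, if_true, pvRepl]
      rw [hstep, ih]
      simp [pvBAux, pvCAux, hc]
    · have hc0 : PySem.Str.endswith p.1 "@@" = false := by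
        simp only [pvCont, Bool.not_eq_true] at hc; exact hc
      by_cases he : cache = ""
      · have hstep : pvAStep (x, r, cache) p = (x ++ [p.1], r ++ [p.2], cache) := by
          simp only [pvAStep]
          rw [if_neg (by rw [hc0]; simp), if_neg (by simp [he])]
        rw [hstep, ih]
        subst he
        simp [pvBAux, pvCAux, hc, pv_empty_append]
      · have hstep : pvAStep (x, r, cache) p = (x ++ [cache ++ p.1], r ++ [p.2], "") := by
          simp only [pvAStep]
          rw [if_neg (by rw [hc0]; simp), if_pos he]
        rw [hstep, ih]
        simp [pvBAux, pvCAux, hc]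

lemma pv_bAux_words (ps : List (String × Int)) :
    ∀ cache : String,
    pvBAux cache ps =
      (match ps.dropWhile pvCont with
       | [] => []
       | p :: rest =>
         (cache ++ PySem.Str.join "" ((ps.takeWhile pvCont).map (fun t => pvRepl t.1)) ++ p.1)
           :: pvWords rest) := by
  induction ps with
  | nil => intro cache; simp [pvBAux]
  | cons p ps ih =>
    intro cache
    by_cases hc : pvCont p = true
    · rw [List.dropWhile_cons_of_pos hc, List.takeWhile_cons_of_pos hc]
      have : pvBAux cache (p :: ps) = pvBAux (cache ++ pvRepl p.1) ps := by
        simp [pvBAux, hc]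
      rw [this, ih]
      cases hd : ps.dropWhile pvCont with
      | nil => simp
      | cons q rest =>
        simp only [List.map_cons, pv_join_empty_cons, pv_append_assoc]
    · rw [List.dropWhile_cons_of_neg (by simpa using hc), List.takeWhile_cons_of_neg (by simpa using hc)]
      have h1 : pvBAux cache (p :: ps) = (cache ++ p.1) :: pvBAux "" ps := by
        simp [pvBAux, hc]
      have h2 : pvBAux "" ps = pvWords ps := by
        rw [ih ""]
        conv_rhs => rw [pvWords]
        cases hd : ps.dropWhile pvCont with
        | nil => simp
        | cons q rest => simp [pv_empty_append]
      rw [h1, h2]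
      simp [pv_join_empty_nil, pv_empty_append]

lemma pv_bAux_nil (ps : List (String × Int)) : pvBAux "" ps = pvWords ps := by
  rw [pv_bAux_words]
  conv_rhs => rw [pvWords]
  cases hd : ps.dropWhile pvCont with
  | nil => simp
  | cons q rest => simp [pv_empty_append]

-- ===== VERDICT (by name: the statement is the Claim_ definition above) =====
theorem reverse_bpe_spec : Claim_equal_reverse_bpe := by
  unfold Claim_equal_reverse_bpe Spec_reverse_bpe
  intro sent reorder _
  unfold reverse_bpe reverse_bpe_alt
  rw [pv_foldA]
  simp [pv_bAux_nil]
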